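-- pv_equiv track=rewrite | github.com/64bit-lab/Logik | logik/evaluator.py | make_envs
-- ===== SOURCE A (Python) =====
-- from itertools import product
--
-- def make_envs(var_list):
--     """
--     @brief      Determine each possible valuation for a set of variables.
--
--     @param      var_list  The variable list
--
--     @return     A list of possible valuations.
--     """
--
--     tab = list(product([0, 1], repeat=len(var_list)))
--     env_list = []
--     for lines in tab:
--         env = {}
--         for i, v in enumerate(var_list):
--             env[v] = lines[i]
--         env_list.append(env)
--     return (env_list, tab)
-- ===== SOURCE B (Python) =====
-- def make_envs(var_list):
--     """
--     @brief      Determine each possible valuation for a set of variables.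
--
--     @param      var_list  The variable list
--     @return     A list of possible valuations.
--     """
--     if not var_list:
--         return ([{}], [()])
--     v = var_list[0]
--     sub_envs, sub_tab = make_envs(var_list[1:])
--     env_list = [{v: b, **e} for b in (0, 1) for e in sub_envs]
--     tab = [(b,) + t for b in (0, 1) for t in sub_tab]
--     return (env_list, tab)
-- ===== Notes on version B (the rewrite author's own statement) =====
-- stated objective: alternative
-- what changed: Replaces the itertools.product call plus a separate index-driven dict-building pass with a structural recursion on the variable list: the valuations for v::rest are built by merging {v: b} with each recursively computed sub-environment ({v: b, **e}) and prefixing b to each sub-tuple, producing both lists in the same recursive descent.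
import Mathlib
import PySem

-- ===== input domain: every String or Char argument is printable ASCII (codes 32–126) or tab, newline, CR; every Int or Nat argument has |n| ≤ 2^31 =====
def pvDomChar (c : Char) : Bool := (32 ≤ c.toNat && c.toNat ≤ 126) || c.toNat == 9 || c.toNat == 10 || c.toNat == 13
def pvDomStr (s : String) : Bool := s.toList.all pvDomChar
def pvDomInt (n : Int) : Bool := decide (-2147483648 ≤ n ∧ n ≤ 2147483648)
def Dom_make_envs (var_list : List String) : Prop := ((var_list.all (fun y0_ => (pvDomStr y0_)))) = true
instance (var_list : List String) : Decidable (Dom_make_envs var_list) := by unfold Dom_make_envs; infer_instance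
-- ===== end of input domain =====

-- B replaces the product call + index-driven dict pass with a structural recursion that
-- builds both lists by merging {v: b} with the sub-solutions; objective: alternative.

-- ===== PORT A =====
-- itertools.product([0, 1], repeat = n): standard recursion, leftmost position varies slowest.
def pyProduct01 : Nat → List (List Int)
  | 0 => [[]]
  | n + 1 => (pyProduct01 n).map (fun t => 0 :: t) ++ (pyProduct01 n).map (fun t => 1 :: t)

def make_envs (var_list : List String) : (List (List (String × Int))) × List (List Int) :=
  let tab := pyProduct01 var_list.length
  let env_list := tab.foldl (fun acc lines =>
    -- env = {}; for i, v in enumerate(var_list): env[v] = lines[i]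
    -- lines[i]: i is always in range (len lines = len var_list), so pyGetD is exact here
    let env := (PySem.List.enumerate var_list).foldl
      (fun (e : PySem.Dict String Int) p => e.insert p.2 (PySem.List.pyGetD lines p.1 0))
      PySem.Dict.empty
    acc ++ [env.items]) []
  (env_list, tab)

-- ===== PORT B =====
-- {v: b, **e}: a fresh dict with v ↦ b first, then e's entries merged in (overwrite keeps position)
def pyMergeEnv (v : String) (b : Int) (e : List (String × Int)) : List (String × Int) :=
  (e.foldl (fun (d : PySem.Dict String Int) q => d.insert q.1 q.2)
    (PySem.Dict.empty.insert v b)).items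

def make_envs_alt : List String → (List (List (String × Int))) × List (List Int)
  | [] => ([[]], [[]])
  | v :: rest =>
    let sub := make_envs_alt rest
    -- [{v: b, **e} for b in (0, 1) for e in sub_envs]
    let env_list := ([(0 : Int), 1]).flatMap (fun b => sub.1.map (fun e => pyMergeEnv v b e))
    -- [(b,) + t for b in (0, 1) for t in sub_tab]
    let tab := ([(0 : Int), 1]).flatMap (fun b => sub.2.map (fun t => b :: t))
    (env_list, tab)

-- ===== PRECONDITION & SPEC =====
def Spec_make_envs (var_list : List String) (out : (List (List (String × Int))) × List (List Int)) : Prop := out = make_envs_alt var_list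
instance (var_list : List String) (out : (List (List (String × Int))) × List (List Int)) : Decidable (Spec_make_envs var_list out) := by unfold Spec_make_envs; infer_instance

-- ===== CLAIM (what is proved, stated in full; the proofs are below) =====
def Claim_equal_make_envs : Prop := ∀ (var_list : List String), Dom_make_envs var_list → Spec_make_envs var_list (make_envs var_list)

-- ===== LEMMAS AND PROOFS =====

-- every tuple produced by product([0,1], repeat=n) has length n
theorem length_mem_pyProduct01 {n : Nat} {t : List Int} (h : t ∈ pyProduct01 n) :
    t.length = n := by
  induction n generalizing t with
  | zero => simp [pyProduct01] at h; simp [h]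
  | succ n ih =>
    simp only [pyProduct01, List.mem_append, List.mem_map] at h
    rcases h with ⟨t', ht', rfl⟩ | ⟨t', ht', rfl⟩ <;> simp [ih ht']

-- inserting two distinct keys commutes when the first is already present
theorem insert_insert_comm_of_contains {κ ν : Type} [BEq κ] [LawfulBEq κ] [DecidableEq κ]
    (d : PySem.Dict κ ν) {k k' : κ} (w : ν) (v' : ν)
    (hk : d.contains k = true) (hne : k' ≠ k) :
    (d.insert k' v').insert k w = (d.insert k w).insert k' v' := by
  apply PySem.Dict.ext
  have hck : (d.insert k' v').contains k = true := by
    rw [PySem.Dict.contains_insert]; simp [hk]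
  by_cases hk' : d.contains k' = true
  · have hck' : (d.insert k w).contains k' = true := by
      rw [PySem.Dict.contains_insert]; simp [hk']
    rw [PySem.Dict.items_insert_of_contains _ _ hck,
      PySem.Dict.items_insert_of_contains _ _ hk',
      PySem.Dict.items_insert_of_contains _ _ hck',
      PySem.Dict.items_insert_of_contains _ _ hk]
    rw [List.map_map, List.map_map]
    apply List.map_congr_left
    intro p _
    simp only [Function.comp_apply]
    by_cases h1 : p.1 = k'
    · simp [h1, hne]
    · by_cases h2 : p.1 = k <;> simp [h1, h2, Ne.symm hne]
  · have hk'f : d.contains k' = false := by simpa using hk'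
    have hck' : (d.insert k w).contains k' = false := by
      rw [PySem.Dict.contains_insert]; simp [hk'f, hne]
    rw [PySem.Dict.items_insert_of_contains _ _ hck,
      PySem.Dict.items_insert_of_not_contains _ _ hk'f,
      PySem.Dict.items_insert_of_not_contains _ _ hck',
      PySem.Dict.items_insert_of_contains _ _ hk]
    rw [List.map_append]
    congr 1
    simp [hne]

-- a final overwrite of an already-present key commutes with a fold over other keys
theorem foldl_insert_of_contains {κ ν : Type} [BEq κ] [LawfulBEq κ] [DecidableEq κ]
    (qs : List (κ × ν)) (d : PySem.Dict κ ν) {k : κ} (w : ν)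
    (hk : d.contains k = true) (hnk : k ∉ qs.map Prod.fst) :
    qs.foldl (fun d q => d.insert q.1 q.2) (d.insert k w)
      = (qs.foldl (fun d q => d.insert q.1 q.2) d).insert k w := by
  induction qs generalizing d with
  | nil => simp
  | cons q qs ih =>
    simp only [List.map_cons, List.mem_cons, not_or] at hnk
    simp only [List.foldl_cons]
    rw [← insert_insert_comm_of_contains d w q.2 hk (fun h => hnk.1 h.symm)]
    exact ih _ (by rw [PySem.Dict.contains_insert]; simp [hk]) hnk.2

-- folding a list of pairs with one key's value replaced = fold then overwrite that key
theorem foldl_insert_map_update {κ ν : Type} [BEq κ] [LawfulBEq κ] [DecidableEq κ]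
    (qs : List (κ × ν)) (d0 : PySem.Dict κ ν) (k : κ) (w : ν)
    (hnd : (qs.map Prod.fst).Nodup) (hmem : k ∈ qs.map Prod.fst) :
    (qs.map (fun p => if p.1 == k then (k, w) else p)).foldl
        (fun d q => d.insert q.1 q.2) d0
      = (qs.foldl (fun d q => d.insert q.1 q.2) d0).insert k w := by
  induction qs generalizing d0 with
  | nil => simp at hmem
  | cons q qs ih =>
    simp only [List.map_cons, List.nodup_cons] at hnd
    simp only [List.map_cons]
    by_cases hq : q.1 = k
    · have hrest : k ∉ qs.map Prod.fst := hq ▸ hnd.1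
      have hid : qs.map (fun p => if p.1 == k then (k, w) else p) = qs := by
        conv_rhs => rw [← List.map_id qs]
        apply List.map_congr_left
        intro p hp
        have : p.1 ≠ k := fun h => hrest (h ▸ List.mem_map_of_mem hp)
        simp [this]
      rw [if_pos (by simp [hq]), hid]
      simp only [List.foldl_cons]
      rw [hq, ← foldl_insert_of_contains qs (d0.insert k q.2) w
          (PySem.Dict.contains_insert_self _ _ _) hrest,
        PySem.Dict.insert_insert_self]
    · rw [if_neg (by simp [hq])]
      simp only [List.foldl_cons]
      refine ih (d0.insert q.1 q.2) hnd.2 ?_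
      rcases List.mem_cons.mp hmem with h | h
      · exact absurd h.symm hq
      · exact h

-- a dict's keys are Nodup along any insert-fold from empty
theorem nodup_fst_items_foldl {κ ν : Type} [BEq κ] [LawfulBEq κ]
    (ps : List (κ × ν)) :
    (((ps.foldl (fun d q => d.insert q.1 q.2) PySem.Dict.empty).items.map Prod.fst)).Nodup := by
  have h := PySem.Dict.nodup_keys_foldl_insert_key ps Prod.fst (fun d q => q.2)
    PySem.Dict.empty (by simp)
  simpa [PySem.Dict.keys] using h

-- MAIN dict lemma: re-inserting a built dict's items into d0 = inserting the original pairs into d0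
theorem foldl_items_foldl {κ ν : Type} [BEq κ] [LawfulBEq κ] [DecidableEq κ]
    (ps : List (κ × ν)) (d0 : PySem.Dict κ ν) :
    ((ps.foldl (fun d q => d.insert q.1 q.2) PySem.Dict.empty).items).foldl
        (fun d q => d.insert q.1 q.2) d0
      = ps.foldl (fun d q => d.insert q.1 q.2) d0 := by
  induction ps using List.reverseRecOn generalizing d0 with
  | nil => simp [PySem.Dict.empty]
  | append_singleton ps p ih =>
    rw [List.foldl_append, List.foldl_append]
    simp only [List.foldl_cons, List.foldl_nil]
    set D := ps.foldl (fun d q => d.insert q.1 q.2) PySem.Dict.empty with hD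
    by_cases hc : D.contains p.1 = true
    · rw [PySem.Dict.items_insert_of_contains _ _ hc]
      rw [foldl_insert_map_update D.items d0 p.1 p.2
        (by rw [hD]; exact nodup_fst_items_foldl ps)
        (by
          have := (PySem.Dict.contains_iff_mem_keys (d := D) (k := p.1)).mp hc
          simpa [PySem.Dict.keys] using this)]
      rw [ih d0]
    · rw [PySem.Dict.items_insert_of_not_contains _ _ (by simpa using hc)]
      rw [List.foldl_append]
      simp only [List.foldl_cons, List.foldl_nil]
      rw [ih d0]

-- A's enumerate/index env build = a zip fold (previous-port characterization)
theorem env_fold_eq (vs : List String) (lines : List Int) (s : Nat)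
    (h : s + vs.length ≤ lines.length) (e : PySem.Dict String Int) :
    (PySem.List.enumerate vs (s : Int)).foldl
        (fun e p => e.insert p.2 (PySem.List.pyGetD lines p.1 0)) e
      = (vs.zip (lines.drop s)).foldl (fun e p => e.insert p.1 p.2) e := by
  induction vs generalizing s e with
  | nil => simp [PySem.List.enumerate_nil]
  | cons v vs ih =>
    have hs : s < lines.length := by simp at h; omega
    rw [PySem.List.enumerate_cons, List.drop_eq_getElem_cons hs]
    simp only [List.zip_cons_cons, List.foldl_cons]
    have hget : PySem.List.pyGetD lines (s : Int) 0 = lines[s] := by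
      rw [PySem.List.pyGetD_natCast]
      exact List.getD_eq_getElem lines 0 hs
    rw [hget]
    have hcast : ((s : Int) + 1) = ((s + 1 : Nat) : Int) := by push_cast; ring
    rw [hcast, ih (s + 1) (by simp at h ⊢; omega)]

-- characterization of B: tab = product, envs = zip-fold dicts over the tuples
theorem alt_eq (vs : List String) :
    make_envs_alt vs =
      ((pyProduct01 vs.length).map
        (fun t => ((vs.zip t).foldl (fun (d : PySem.Dict String Int) q => d.insert q.1 q.2)
          PySem.Dict.empty).items),
       pyProduct01 vs.length) := by
  induction vs with
  | nil => simp [make_envs_alt, pyProduct01, PySem.Dict.empty]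
  | cons v rest ih =>
    simp only [make_envs_alt, ih, List.length_cons, pyProduct01]
    rw [Prod.mk.injEq]
    refine ⟨?_, ?_⟩
    · simp only [List.flatMap_cons, List.flatMap_nil, List.append_nil, List.map_map,
        List.map_append, List.map_map]
      congr 1 <;>
      · apply List.map_congr_left
        intro t _
        simp only [Function.comp_apply, pyMergeEnv, List.zip_cons_cons, List.foldl_cons]
        rw [foldl_items_foldl]
    · simp [List.flatMap_cons]

-- ===== VERDICT (by name: the statement is the Claim_ definition above) =====
theorem make_envs_spec : Claim_equal_make_envs := by
  intro var_list _
  unfold Spec_make_envs make_envs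
  rw [alt_eq]
  simp only []
  rw [Prod.mk.injEq]
  refine ⟨?_, rfl⟩
  rw [PySem.List.foldl_append_singleton_eq_map]
  apply List.map_congr_left
  intro lines hlines
  have hlen : lines.length = var_list.length := length_mem_pyProduct01 hlines
  have := env_fold_eq var_list lines 0 (by omega) PySem.Dict.empty
  simp only [Nat.cast_zero, List.drop_zero] at this
  rw [this]
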